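-- pv_equiv track=rewrite | github.com/projectaligned/setplayer | setplayer.py | find_collinear
-- ===== SOURCE A (Python) =====
-- import itertools
-- from typing import Tuple, List, Optional
--
-- CardCode = Tuple[int, int, int, int]
--
-- CardCombination = Tuple[Tuple[int, CardCode], Tuple[int, CardCode], Tuple[int, CardCode]]
--
-- WinningIndices = Tuple[int, int, int]
--
-- def test_combination(card_combination: CardCombination) -> Tuple[bool, WinningIndices]:
--     (indices_a, code_a), (indices_b, code_b), (indices_c, code_c) = card_combination
--     winning = True
--     for i in range(4):
--         coord_sum = code_a[i] + code_b[i] + code_c[i]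
--         coord_remainder = coord_sum % 3
--         winning = winning and coord_remainder == 0
--     return winning, (indices_a, indices_b, indices_c)
--
-- def filter_test_result(test_result: Tuple[bool, WinningIndices]) -> bool:
--     winning, combination = test_result
--     return winning
--
-- def find_collinear(card_codes: List[CardCode]) -> Optional[WinningIndices]:
--     card_combinations = itertools.combinations(enumerate(card_codes), 3)
--     test_results = [test_combination(combination) for combination in card_combinations]
--
--     winners = list(filter(filter_test_result, test_results))
--     if len(winners) > 0:
--         winning_indices = winners[0][1]
--     else:
--         winning_indices = None
--     return winning_indices
-- ===== SOURCE B (Python) =====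
-- # Hash-indexed pair search: bucket card indices by their coordinate-wise mod-3
-- # signature, then for each pair (i, j) look up the unique signature a third card
-- # must have and take the first bucketed index beyond j; exits at the first hit
-- # instead of materializing and testing all C(n,3) combinations like A.
-- def find_collinear(card_codes):
--     n = len(card_codes)
--     if n < 3:
--         return None
--     keys = [tuple(c[m] % 3 for m in range(4)) for c in card_codes]
--     index_by_key = {}
--     for idx, key in enumerate(keys):
--         index_by_key.setdefault(key, []).append(idx)
--     for i in range(n - 2):
--         key_i = keys[i]
--         for j in range(i + 1, n - 1):
--             key_j = keys[j]
--             required = tuple((-(key_i[m] + key_j[m])) % 3 for m in range(4))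
--             for k in index_by_key.get(required, []):
--                 if k > j:
--                     return (i, j, k)
--     return None
-- ===== Notes on version B (the rewrite author's own statement) =====
-- stated objective: faster
-- what changed: Instead of materializing and testing every 3-combination, B buckets card indices by their mod-3 coordinate signature in a dict, then for each index pair (i,j) computes the unique signature the third card must have, looks it up and takes the first bucketed index beyond j, returning at the first hit.
import Mathlib
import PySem

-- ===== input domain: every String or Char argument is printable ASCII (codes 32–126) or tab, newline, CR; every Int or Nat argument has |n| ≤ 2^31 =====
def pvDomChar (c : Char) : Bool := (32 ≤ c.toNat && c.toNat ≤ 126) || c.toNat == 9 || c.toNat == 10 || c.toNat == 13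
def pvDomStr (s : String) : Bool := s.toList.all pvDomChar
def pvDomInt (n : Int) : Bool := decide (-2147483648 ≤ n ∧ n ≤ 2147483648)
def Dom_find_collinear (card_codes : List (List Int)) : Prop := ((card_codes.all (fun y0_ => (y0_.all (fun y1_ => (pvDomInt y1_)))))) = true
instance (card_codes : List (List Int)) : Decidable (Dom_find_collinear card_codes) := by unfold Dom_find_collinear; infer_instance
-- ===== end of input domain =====

-- B replaces A's exhaustive test of all 3-combinations by a dict bucketing card
-- indices per mod-3 signature, a pair loop looking up the unique required third
-- signature, and an early exit (objective: faster; measured).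

-- ===== PORT A =====
def test_combination (t : List (Int × List Int)) : Bool × List Int :=
  match t with
  | [(ia, ca), (ib, cb), (ic, cc)] =>
    ((PySem.List.pyRange 0 4).foldl (fun w i =>
        w && (PySem.Int.mod (PySem.List.pyGetD ca i 0 + PySem.List.pyGetD cb i 0 + PySem.List.pyGetD cc i 0) 3 == 0)) true,
     [ia, ib, ic])
  | _ => (false, [])   -- unreachable: `combinations … 3` yields length-3 lists

def filter_test_result (r : Bool × List Int) : Bool := r.1

def find_collinear (card_codes : List (List Int)) : Option (List Int) :=
  let card_combinations := PySem.List.combinations (PySem.List.enumerate card_codes) 3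
  let test_results := card_combinations.map test_combination
  let winners := test_results.filter filter_test_result
  match winners with
  | w :: _ => some w.2
  | [] => none

-- ===== PORT B =====
def pvKeyRow (c : List Int) : List Int :=
  (PySem.List.pyRange 0 4).map (fun m => PySem.Int.mod (PySem.List.pyGetD c m 0) 3)

def pvReq (ki kj : List Int) : List Int :=
  (PySem.List.pyRange 0 4).map (fun m =>
    PySem.Int.mod (-(PySem.List.pyGetD ki m 0 + PySem.List.pyGetD kj m 0)) 3)

def pvIndexByKey (keys : List (List Int)) : PySem.Dict (List Int) (List Int) :=
  (PySem.List.enumerate keys).foldl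
    (fun d p => d.insert p.2 (d.getD p.2 [] ++ [p.1])) PySem.Dict.empty

def find_collinear_alt (card_codes : List (List Int)) : Option (List Int) :=
  let n : Int := card_codes.length
  if n < 3 then none else
  let keys := card_codes.map pvKeyRow
  let d := pvIndexByKey keys
  (PySem.List.pyRange 0 (n - 2)).findSome? (fun i =>
    let ki := PySem.List.pyGetD keys i []
    (PySem.List.pyRange (i + 1) (n - 1)).findSome? (fun j =>
      let kj := PySem.List.pyGetD keys j []
      ((d.getD (pvReq ki kj) []).find? (fun k => decide (j < k))).map (fun k => [i, j, k])))

-- ===== PRECONDITION & SPEC =====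
-- Pre_ excludes exactly the inputs where Python A raises IndexError: three or more
-- cards with some card shorter than 4 coordinates (test_combination reads coords 0..3);
-- B raises the same IndexError there.
def Pre_find_collinear (card_codes : List (List Int)) : Prop :=
  3 ≤ card_codes.length → ∀ c ∈ card_codes, 4 ≤ c.length
instance (card_codes : List (List Int)) : Decidable (Pre_find_collinear card_codes) := by
  unfold Pre_find_collinear; infer_instance
def pvWitness_find_collinear : List (List Int) := [[0,0,0,0],[1,1,1,1],[2,2,2,2]]
def Spec_find_collinear (card_codes : List (List Int)) (out : Option (List Int)) : Prop := out = find_collinear_alt card_codes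
instance (card_codes : List (List Int)) (out : Option (List Int)) : Decidable (Spec_find_collinear card_codes out) := by unfold Spec_find_collinear; infer_instance

-- ===== CLAIM (what is proved, stated in full; the proofs are below) =====
def Claim_equal_find_collinear : Prop := ∀ (card_codes : List (List Int)), Dom_find_collinear card_codes → Pre_find_collinear card_codes → Spec_find_collinear card_codes (find_collinear card_codes)

-- ===== LEMMAS AND PROOFS =====

-- the first winning index triple, as three nested index loops (both ports reduce to this)
def pvWin (cs : List (List Int)) (i j k : Int) : Bool :=
  (test_combination [(i, PySem.List.pyGetD cs i []), (j, PySem.List.pyGetD cs j []),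
                     (k, PySem.List.pyGetD cs k [])]).1

def pvNF (cs : List (List Int)) : Option (List Int) :=
  let n : Int := cs.length
  (PySem.List.pyRange 0 n).findSome? (fun i =>
    (PySem.List.pyRange (i + 1) n).findSome? (fun j =>
      (PySem.List.pyRange (j + 1) n).findSome? (fun k =>
        if pvWin cs i j k then some [i, j, k] else none)))

-- suffix sweeps: the shape `combinations _ 2/3` induces on `findSome?`
def pvSweep2 {α β : Type} (h : α → α → Option β) : List α → Option β
  | [] => none
  | b :: r => (r.findSome? (h b)).or (pvSweep2 h r)

def pvSweep3 {α β : Type} (h : α → α → α → Option β) : List α → Option β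
  | [] => none
  | a :: r => (pvSweep2 (h a) r).or (pvSweep3 h r)

theorem pv_findSome?_congr_mem {α β : Type} {l : List α} {f g : α → Option β}
    (h : ∀ x ∈ l, f x = g x) : l.findSome? f = l.findSome? g := by
  induction l with
  | nil => rfl
  | cons x r ih =>
    simp only [List.findSome?_cons, h x (by simp)]
    cases g x with
    | none => exact ih (fun y hy => h y (by simp [hy]))
    | some v => rfl

theorem pv_headFilter (l : List (Bool × List Int)) :
    (match l.filter filter_test_result with
     | w :: _ => some w.2
     | [] => none) = l.findSome? (fun r => if r.1 then some r.2 else none) := by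
  induction l with
  | nil => rfl
  | cons x r ih =>
    by_cases hx : x.1 <;> simp [filter_test_result, hx, ih]

theorem pv_comb2 {α β : Type} (l : List α) (F : List α → Option β) :
    (PySem.List.combinations l 2).findSome? F = pvSweep2 (fun b c => F [b, c]) l := by
  induction l with
  | nil => rfl
  | cons x r ih =>
    rw [show (2 : Nat) = 1 + 1 from rfl, PySem.List.combinations_cons_succ]
    simp only [List.findSome?_append, List.findSome?_map, PySem.List.combinations_one,
      pvSweep2, ih]
    rfl

theorem pv_comb3 {α β : Type} (l : List α) (F : List α → Option β) :
    (PySem.List.combinations l 3).findSome? F = pvSweep3 (fun a b c => F [a, b, c]) l := by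
  induction l with
  | nil => rfl
  | cons x r ih =>
    rw [show (3 : Nat) = 2 + 1 from rfl, PySem.List.combinations_cons_succ]
    simp only [List.findSome?_append, List.findSome?_map, pvSweep3, ih]
    congr 1
    rw [pv_comb2]
    rfl

theorem pv_sweep2_map {α γ β : Type} (f : α → γ) (h : γ → γ → Option β) (l : List α) :
    pvSweep2 h (l.map f) = pvSweep2 (fun a b => h (f a) (f b)) l := by
  induction l with
  | nil => rfl
  | cons x r ih => simp only [List.map_cons, pvSweep2, ih, List.findSome?_map]; rfl

theorem pv_sweep3_map {α γ β : Type} (f : α → γ) (h : γ → γ → γ → Option β) (l : List α) :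
    pvSweep3 h (l.map f) = pvSweep3 (fun a b c => h (f a) (f b) (f c)) l := by
  induction l with
  | nil => rfl
  | cons x r ih => simp only [List.map_cons, pvSweep3, ih, pv_sweep2_map]

theorem pv_sweep2_pyRange {β : Type} (b : Int) (h : Int → Int → Option β) : ∀ (a : Int),
    pvSweep2 h (PySem.List.pyRange a b) =
      (PySem.List.pyRange a b).findSome? (fun i => (PySem.List.pyRange (i + 1) b).findSome? (h i)) := by
  have main : ∀ (n : Nat) (a : Int), (b - a).toNat ≤ n →
      pvSweep2 h (PySem.List.pyRange a b) =
      (PySem.List.pyRange a b).findSome? (fun i => (PySem.List.pyRange (i + 1) b).findSome? (h i)) := by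
    intro n
    induction n with
    | zero =>
      intro a ha
      rw [PySem.List.pyRange_one_eq_nil (by omega)]
      rfl
    | succ n ih =>
      intro a ha
      by_cases hab : a < b
      · rw [PySem.List.pyRange_one_cons hab]
        simp only [pvSweep2, List.findSome?_cons]
        rw [ih (a + 1) (by omega)]
        cases List.findSome? (h a) (PySem.List.pyRange (a + 1) b) <;> rfl
      · rw [PySem.List.pyRange_one_eq_nil (by omega)]
        rfl
  exact fun a => main (b - a).toNat a le_rfl

theorem pv_sweep3_pyRange {β : Type} (b : Int) (h : Int → Int → Int → Option β) : ∀ (a : Int),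
    pvSweep3 h (PySem.List.pyRange a b) =
      (PySem.List.pyRange a b).findSome? (fun i =>
        (PySem.List.pyRange (i + 1) b).findSome? (fun j =>
          (PySem.List.pyRange (j + 1) b).findSome? (h i j))) := by
  have main : ∀ (n : Nat) (a : Int), (b - a).toNat ≤ n →
      pvSweep3 h (PySem.List.pyRange a b) =
      (PySem.List.pyRange a b).findSome? (fun i =>
        (PySem.List.pyRange (i + 1) b).findSome? (fun j =>
          (PySem.List.pyRange (j + 1) b).findSome? (h i j))) := by
    intro n
    induction n with
    | zero =>
      intro a ha
      rw [PySem.List.pyRange_one_eq_nil (by omega)]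
      rfl
    | succ n ih =>
      intro a ha
      by_cases hab : a < b
      · rw [PySem.List.pyRange_one_cons hab]
        simp only [pvSweep3, List.findSome?_cons]
        rw [ih (a + 1) (by omega), pv_sweep2_pyRange]
        cases List.findSome? (fun j => List.findSome? (h a j) (PySem.List.pyRange (j + 1) b))
          (PySem.List.pyRange (a + 1) b) <;> rfl
      · rw [PySem.List.pyRange_one_eq_nil (by omega)]
        rfl
  exact fun a => main (b - a).toNat a le_rfl

theorem pv_A_eq_pvNF (cs : List (List Int)) : find_collinear cs = pvNF cs := by
  show (match (List.map test_combination (PySem.List.combinations (PySem.List.enumerate cs) 3)).filter filter_test_result with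
        | w :: _ => some w.2
        | [] => none) = pvNF cs
  rw [pv_headFilter, List.findSome?_map, pv_comb3]
  rw [PySem.List.enumerate_eq_map_pyRange cs [], pv_sweep3_map, pv_sweep3_pyRange]
  rfl

theorem pv_small (cs : List (List Int)) (h : (cs.length : Int) < 3) :
    find_collinear cs = none := by
  show (match (List.map test_combination (PySem.List.combinations (PySem.List.enumerate cs) 3)).filter filter_test_result with
        | w :: _ => some w.2
        | [] => none) = none
  rw [PySem.List.combinations_eq_nil_of_length_lt (PySem.List.enumerate cs) (r := 3)
    (by rw [PySem.List.length_enumerate]; omega)]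
  rfl

theorem pv_build (l : List (List Int)) : ∀ (s : Int) (d : PySem.Dict (List Int) (List Int)) (r : List Int),
    ((PySem.List.enumerate l s).foldl
      (fun d p => d.insert p.2 (d.getD p.2 [] ++ [p.1])) d).getD r []
    = d.getD r [] ++ (PySem.List.enumerate l s).filterMap
        (fun p => if p.2 = r then some p.1 else none) := by
  induction l with
  | nil => intro s d r; simp [PySem.List.enumerate_nil]
  | cons x xs ih =>
    intro s d r
    rw [PySem.List.enumerate_cons]
    simp only [List.foldl_cons, List.filterMap_cons]
    rw [ih]
    by_cases hx : x = r
    · subst hx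
      rw [PySem.Dict.getD_insert]
      simp
    · rw [PySem.Dict.getD_insert]
      simp [hx, Ne.symm hx]

theorem pv_find?_filterMap {α β : Type} (l : List α) (f : α → Option β) (q : β → Bool) :
    (l.filterMap f).find? q =
      l.findSome? (fun x => match f x with
        | some y => if q y then some y else none
        | none => none) := by
  induction l with
  | nil => rfl
  | cons x r ih =>
    simp only [List.filterMap_cons, List.findSome?_cons]
    cases hf : f x with
    | none => exact ih
    | some y =>
      by_cases hq : q y
      · simp [hq]
      · simp [hq, ih]

theorem pv_findSome?_map_option {α β γ : Type} (l : List α) (h : α → Option β) (g : β → γ) :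
    (l.findSome? h).map g = l.findSome? (fun x => (h x).map g) := by
  induction l with
  | nil => rfl
  | cons x r ih =>
    simp only [List.findSome?_cons]
    cases h x with
    | none => exact ih
    | some v => rfl

theorem pv_range_lt {β : Type} (n j : Int) (hj : 0 ≤ j) (g : Int → Option β) :
    (PySem.List.pyRange 0 n).findSome? (fun k => if j < k then g k else none)
    = (PySem.List.pyRange (j + 1) n).findSome? g := by
  by_cases hn : n ≤ j + 1
  · rw [PySem.List.pyRange_one_eq_nil hn]
    rw [List.findSome?_eq_none_iff.mpr]
    · rfl
    · intro x hx
      rw [PySem.List.mem_pyRange_one] at hx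
      simp only [if_neg (by omega : ¬ j < x)]
  · rw [PySem.List.pyRange_one_append 0 (j + 1) n (by omega) (by omega), List.findSome?_append]
    rw [List.findSome?_eq_none_iff.mpr]
    · rw [Option.none_or]
      apply pv_findSome?_congr_mem
      intro x hx
      rw [PySem.List.mem_pyRange_one] at hx
      rw [if_pos (by omega)]
    · intro x hx
      rw [PySem.List.mem_pyRange_one] at hx
      simp only [if_neg (by omega : ¬ j < x)]

theorem pv_range_ext {β : Type} (a m n : Int) (h1 : a ≤ m) (h2 : m ≤ n) (g : Int → Option β)
    (hnone : ∀ x, m ≤ x → x < n → g x = none) :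
    (PySem.List.pyRange a n).findSome? g = (PySem.List.pyRange a m).findSome? g := by
  rw [PySem.List.pyRange_one_append a m n h1 h2, List.findSome?_append]
  rw [(List.findSome?_eq_none_iff.mpr (fun x hx => by
        rw [PySem.List.mem_pyRange_one] at hx
        exact hnone x hx.1 hx.2) : (PySem.List.pyRange m n).findSome? g = none)]
  exact Option.or_none

theorem pv_key_iff (cs : List (List Int)) (i j k : Int) :
    (pvKeyRow (PySem.List.pyGetD cs k []) =
       pvReq (pvKeyRow (PySem.List.pyGetD cs i [])) (pvKeyRow (PySem.List.pyGetD cs j [])))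
    ↔ pvWin cs i j k = true := by
  have key : ∀ (a b c : List Int) (ia ib ic : Int),
      (pvKeyRow c = pvReq (pvKeyRow a) (pvKeyRow b))
      ↔ (test_combination [(ia, a), (ib, b), (ic, c)]).1 = true := by
    intro a b c ia ib ic
    have h3 : (0:Int) < 3 := by omega
    simp only [pvKeyRow, pvReq, test_combination,
      show PySem.List.pyRange 0 4 = [0,1,2,3] from rfl,
      List.map, List.foldl, PySem.Int.mod_eq_emod_of_pos h3]
    simp only [show ∀ (x y z w : Int),
        PySem.List.pyGetD [x, y, z, w] 0 0 = x ∧ PySem.List.pyGetD [x, y, z, w] 1 0 = y ∧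
        PySem.List.pyGetD [x, y, z, w] 2 0 = z ∧ PySem.List.pyGetD [x, y, z, w] 3 0 = w from
        fun x y z w => ⟨rfl, rfl, rfl, rfl⟩]
    simp only [List.cons.injEq, and_true, Bool.true_and, Bool.and_eq_true, beq_iff_eq]
    constructor
    · rintro ⟨h0, h1, h2, h3⟩
      refine ⟨⟨⟨?_, ?_⟩, ?_⟩, ?_⟩ <;> omega
    · rintro ⟨⟨⟨h0, h1⟩, h2⟩, h3⟩
      refine ⟨?_, ?_, ?_, ?_⟩ <;> omega
  exact key _ _ _ i j k
theorem pv_B_eq_pvNF (cs : List (List Int)) (h : ¬ ((cs.length : Int) < 3)) :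
    find_collinear_alt cs = pvNF cs := by
  have hn : (3 : Int) ≤ (cs.length : Int) := by omega
  set n : Int := (cs.length : Int) with hn_def
  set keys := cs.map pvKeyRow with hkeys
  have hlenkeys : (keys.length : Int) = n := by rw [hkeys, List.length_map]
  -- lookups into `keys` at in-range positions are `pvKeyRow` of the card
  have hkey_at : ∀ (t : Int), 0 ≤ t → t < n →
      PySem.List.pyGetD keys t [] = pvKeyRow (PySem.List.pyGetD cs t []) := by
    intro t h0 h1
    rw [PySem.List.pyGetD_eq_getElem keys [] h0 (by omega),
        PySem.List.pyGetD_eq_getElem cs [] h0 (by omega)]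
    simp [hkeys]
  -- the bucket of any signature r lists, in order, the indices holding r
  have hbucket : ∀ r, (pvIndexByKey keys).getD r [] =
      (PySem.List.enumerate keys).filterMap (fun p => if p.2 = r then some p.1 else none) := by
    intro r
    rw [pvIndexByKey, pv_build]
    simp [PySem.Dict.getD, PySem.Dict.empty, PySem.Dict.get?]
  have step : (PySem.List.pyRange 0 (n - 2)).findSome? (fun i =>
      let ki := PySem.List.pyGetD keys i []
      (PySem.List.pyRange (i + 1) (n - 1)).findSome? (fun j =>
        let kj := PySem.List.pyGetD keys j []
        (((pvIndexByKey keys).getD (pvReq ki kj) []).find? (fun k => decide (j < k))).map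
          (fun k => [i, j, k])))
      = (PySem.List.pyRange 0 n).findSome? (fun i =>
          (PySem.List.pyRange (i + 1) n).findSome? (fun j =>
            (PySem.List.pyRange (j + 1) n).findSome? (fun k =>
              if pvWin cs i j k then some [i, j, k] else none))) := by
    rw [show (PySem.List.pyRange 0 n).findSome? (fun i =>
          (PySem.List.pyRange (i + 1) n).findSome? (fun j =>
            (PySem.List.pyRange (j + 1) n).findSome? (fun k =>
              if pvWin cs i j k then some [i, j, k] else none)))
        = (PySem.List.pyRange 0 (n - 2)).findSome? (fun i =>
          (PySem.List.pyRange (i + 1) n).findSome? (fun j =>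
            (PySem.List.pyRange (j + 1) n).findSome? (fun k =>
              if pvWin cs i j k then some [i, j, k] else none))) from
      pv_range_ext 0 (n - 2) n (by omega) (by omega) _ (by
        intro i hi1 hi2
        rw [List.findSome?_eq_none_iff]
        intro j hj
        rw [PySem.List.mem_pyRange_one] at hj
        rw [PySem.List.pyRange_one_eq_nil (by omega)]
        rfl)]
    apply pv_findSome?_congr_mem
    intro i hi
    rw [PySem.List.mem_pyRange_one] at hi
    show (PySem.List.pyRange (i + 1) (n - 1)).findSome? _ = _
    rw [show (PySem.List.pyRange (i + 1) n).findSome? (fun j =>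
          (PySem.List.pyRange (j + 1) n).findSome? (fun k =>
            if pvWin cs i j k then some [i, j, k] else none))
        = (PySem.List.pyRange (i + 1) (n - 1)).findSome? (fun j =>
          (PySem.List.pyRange (j + 1) n).findSome? (fun k =>
            if pvWin cs i j k then some [i, j, k] else none)) from
      pv_range_ext (i + 1) (n - 1) n (by omega) (by omega) _ (by
        intro j hj1 hj2
        rw [PySem.List.pyRange_one_eq_nil (by omega)]
        rfl)]
    apply pv_findSome?_congr_mem
    intro j hj
    rw [PySem.List.mem_pyRange_one] at hj
    show (((pvIndexByKey keys).getD _ []).find? _).map _ = _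
    rw [hbucket, pv_find?_filterMap, pv_findSome?_map_option,
        PySem.List.enumerate_eq_map_pyRange keys [], List.findSome?_map]
    rw [show PySem.List.len keys = n from by rw [← hlenkeys]; rfl]
    refine Eq.trans (pv_findSome?_congr_mem (g := fun k =>
        if j < k then (if PySem.List.pyGetD keys k [] =
          pvReq (PySem.List.pyGetD keys i []) (PySem.List.pyGetD keys j [])
          then some [i, j, k] else none) else none) ?_) ?_
    · intro k _
      simp only [Function.comp_apply]
      by_cases hc : PySem.List.pyGetD keys k [] =
          pvReq (PySem.List.pyGetD keys i []) (PySem.List.pyGetD keys j [])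
      · by_cases hjk : j < k <;> simp [hc, hjk]
      · simp [hc]
    · rw [pv_range_lt n j (by omega)]
      apply pv_findSome?_congr_mem
      intro k hk
      rw [PySem.List.mem_pyRange_one] at hk
      rw [hkey_at i (by omega) (by omega), hkey_at j (by omega) (by omega),
          hkey_at k (by omega) (by omega)]
      by_cases hw : pvWin cs i j k
      · rw [if_pos ((pv_key_iff cs i j k).mpr hw), if_pos hw]
      · rw [if_neg (fun hc => hw ((pv_key_iff cs i j k).mp hc)),
            if_neg (by simpa using hw)]
  rw [show find_collinear_alt cs = (PySem.List.pyRange 0 (n - 2)).findSome? (fun i =>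
      let ki := PySem.List.pyGetD keys i []
      (PySem.List.pyRange (i + 1) (n - 1)).findSome? (fun j =>
        let kj := PySem.List.pyGetD keys j []
        (((pvIndexByKey keys).getD (pvReq ki kj) []).find? (fun k => decide (j < k))).map
          (fun k => [i, j, k]))) from by
    unfold find_collinear_alt
    rw [if_neg h]]
  rw [step]
  rfl

-- ===== VERDICT (by name: the statement is the Claim_ definition above) =====
theorem find_collinear_spec : Claim_equal_find_collinear := by
  intro cs _ _
  unfold Spec_find_collinear
  by_cases h : (cs.length : Int) < 3
  · rw [pv_small cs h]
    unfold find_collinear_alt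
    simp [h]
  · rw [pv_A_eq_pvNF cs, pv_B_eq_pvNF cs h]
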